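-- pv_equiv track=rewrite | github.com/MuhammadMehdiRaza/AI_Semester_Project | AI_Project/data/generated_dataset/files/code_trans_179.py | factorial_sum_v5
-- ===== SOURCE A (Python) =====
-- import math
--
-- def factorial_sum_v5(n):
--     accumulator = 0
-- # TODO: Review this
--     for i in range(1, n + 1):
--         if i % 2 == 0:
--             accumulator += math.factorial(i)
--         else:
--             accumulator += i
--     return accumulator
-- ===== SOURCE B (Python) =====
-- def factorial_sum_v5(n):
--     if n < 1:
--         return 0
--     total = ((n + 1) // 2) ** 2  # closed form: sum of the odd i in 1..n
--     f = 1  # running factorial of the last even index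
--     for j in range(2, n + 1, 2):
--         f *= (j - 1) * j
--         total += f
--     return total
-- ===== Notes on version B (the rewrite author's own statement) =====
-- stated objective: faster
-- what changed: B replaces A's per-iteration math.factorial calls (recomputing i! from scratch each even i) by a closed-form formula for the sum of the odd indices plus a single incrementally maintained running factorial over the even indices.
import Mathlib
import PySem

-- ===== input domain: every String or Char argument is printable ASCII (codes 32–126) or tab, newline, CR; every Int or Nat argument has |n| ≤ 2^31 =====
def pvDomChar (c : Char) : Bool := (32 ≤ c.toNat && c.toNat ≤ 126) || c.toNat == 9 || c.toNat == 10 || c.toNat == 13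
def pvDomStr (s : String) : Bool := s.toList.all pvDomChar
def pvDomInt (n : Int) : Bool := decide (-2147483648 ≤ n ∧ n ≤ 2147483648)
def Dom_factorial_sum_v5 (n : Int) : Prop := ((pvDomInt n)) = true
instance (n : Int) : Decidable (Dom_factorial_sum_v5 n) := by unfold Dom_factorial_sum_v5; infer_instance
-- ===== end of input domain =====

-- B replaces A's per-iteration math.factorial calls by a closed-form sum of the odd
-- indices plus one incrementally maintained running factorial (faster in a timing run).

-- ===== PORT A =====
-- literal port of A: one loop over range(1, n+1); math.factorial i = Nat.factorial i.toNat (i ≥ 1 here)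
def factorial_sum_v5 (n : Int) : Int :=
  (PySem.List.pyRange 1 (n + 1) 1).foldl
    (fun acc i =>
      if PySem.Int.mod i 2 = 0 then acc + ((Nat.factorial i.toNat : Nat) : Int)
      else acc + i)
    0

-- ===== PORT B =====
-- literal port of Source B: early return 0, closed-form odd sum, fold over range(2, n+1, 2) with state (f, total)
def factorial_sum_v5_alt (n : Int) : Int :=
  if n < 1 then 0
  else
    let total := (PySem.Int.floordiv (n + 1) 2) ^ 2
    ((PySem.List.pyRange 2 (n + 1) 2).foldl
      (fun (p : Int × Int) j =>
        let f := p.1 * ((j - 1) * j)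
        (f, p.2 + f))
      (1, total)).2

-- ===== PRECONDITION & SPEC =====
def Spec_factorial_sum_v5 (n : Int) (out : Int) : Prop := out = factorial_sum_v5_alt n
instance (n : Int) (out : Int) : Decidable (Spec_factorial_sum_v5 n out) := by unfold Spec_factorial_sum_v5; infer_instance

-- ===== CLAIM (what is proved, stated in full; the proofs are below) =====
def Claim_equal_factorial_sum_v5 : Prop := ∀ (n : Int), Dom_factorial_sum_v5 n → Spec_factorial_sum_v5 n (factorial_sum_v5 n)

-- ===== LEMMAS AND PROOFS =====

-- sum of factorials of the even numbers 2, 4, …, 2e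
def evenFacSum : Nat → Int
  | 0 => 0
  | e + 1 => evenFacSum e + ((Nat.factorial (2 * (e + 1)) : Nat) : Int)

-- what A's loop accumulates after the first m iterations
def aAcc : Nat → Int
  | 0 => 0
  | m + 1 => aAcc m + (if (m + 1) % 2 = 0 then ((Nat.factorial (m + 1) : Nat) : Int) else ((m + 1 : Nat) : Int))

lemma aloop (m : Nat) :
    (PySem.List.pyRange 1 ((m : Int) + 1) 1).foldl
      (fun acc i =>
        if PySem.Int.mod i 2 = 0 then acc + ((Nat.factorial i.toNat : Nat) : Int)
        else acc + i)
      0 = aAcc m := by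
  induction m with
  | zero => simp [PySem.List.pyRange_one_eq_nil (by omega : (1:Int) ≤ 1), aAcc]
  | succ m ih =>
    have hc2 : ((m + 1 : Nat) : Int) + 1 = (((m : Int) + 1) + 1) := by push_cast; ring
    rw [hc2, PySem.List.pyRange_one_succ_right (by omega : (1:Int) ≤ (m:Int) + 1),
      List.foldl_append, ih]
    have hc : ((m : Int) + 1) = ((m + 1 : Nat) : Int) := by push_cast; ring
    simp only [List.foldl_cons, List.foldl_nil]
    rw [PySem.Int.mod_eq_emod_of_pos (by omega : (0:Int) < 2)]
    by_cases hp : (m + 1) % 2 = 0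
    · rw [if_pos (by omega), aAcc, if_pos hp, hc, Int.toNat_natCast]
    · rw [if_neg (by omega), aAcc, if_neg hp, hc]

lemma bloop (e : Nat) (t : Int) :
    ((List.range e).map (fun (k : Nat) => 2 + 2 * (k : Int))).foldl
      (fun (p : Int × Int) j =>
        let f := p.1 * ((j - 1) * j)
        (f, p.2 + f))
      (1, t) = (((Nat.factorial (2 * e) : Nat) : Int), t + evenFacSum e) := by
  induction e with
  | zero => simp [evenFacSum]
  | succ e ih =>
    rw [List.range_succ, List.map_append, List.foldl_append, ih]
    simp only [List.map, List.foldl, evenFacSum]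
    have h2 : 2 * (e + 1) = (2 * e + 1) + 1 := by ring
    rw [h2, Nat.factorial_succ, Nat.factorial_succ, Prod.mk.injEq]
    constructor
    · push_cast; ring
    · push_cast; ring

-- closed form: A's accumulator = (odd count)² + sum of even factorials
lemma aAcc_closed (m : Nat) :
    aAcc m = (((m + 1) / 2 : Nat) : Int) ^ 2 + evenFacSum (m / 2) := by
  induction m with
  | zero => simp [aAcc, evenFacSum]
  | succ m ih =>
    rcases Nat.even_or_odd m with ⟨q, hq⟩ | ⟨q, hq⟩
    · subst hq
      rw [aAcc, ih, if_neg (by omega)]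
      have h2 : (q + q + 1 + 1) / 2 = q + 1 := by omega
      have h3 : (q + q + 1) / 2 = q := by omega
      have h4 : (q + q) / 2 = q := by omega
      rw [h2, h3, h4]
      push_cast; ring
    · subst hq
      rw [aAcc, ih, if_pos (by omega)]
      have h2 : (2 * q + 1 + 1 + 1) / 2 = q + 1 := by omega
      have h3 : (2 * q + 1 + 1) / 2 = q + 1 := by omega
      have h4 : (2 * q + 1) / 2 = q := by omega
      have h5 : 2 * q + 1 + 1 = 2 * (q + 1) := by ring
      rw [h2, h3, h4, h5, evenFacSum]
      ring

-- ===== VERDICT (by name: the statement is the Claim_ definition above) =====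
theorem factorial_sum_v5_spec : Claim_equal_factorial_sum_v5 := by
  intro n _
  unfold Spec_factorial_sum_v5 factorial_sum_v5 factorial_sum_v5_alt
  by_cases hn : n < 1
  · rw [PySem.List.pyRange_one_eq_nil (by omega : n + 1 ≤ 1)]
    simp [hn]
  · push_neg at hn
    have hm : n = ((n.toNat : Nat) : Int) := by omega
    set m : Nat := n.toNat with hmdef
    have hm1 : 1 ≤ m := by omega
    rw [if_neg (by omega)]
    rw [hm, aloop m]
    rw [PySem.List.pyRange_of_pos 2 (((m : Nat) : Int) + 1) (by omega : (0:Int) < 2)]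
    have he : (if (2 : Int) < ((m : Nat) : Int) + 1 then
        (((((m : Nat) : Int) + 1) - 2 + 2 - 1) / 2).toNat else 0) = m / 2 := by
      by_cases h2 : (2 : Int) < ((m : Nat) : Int) + 1
      · rw [if_pos h2]
        have h : ((((m : Nat) : Int) + 1) - 2 + 2 - 1) = ((m : Nat) : Int) := by ring
        rw [h]
        omega
      · rw [if_neg h2]
        omega
    rw [he]
    have hk : PySem.Int.floordiv (((m : Nat) : Int) + 1) 2 = (((m + 1) / 2 : Nat) : Int) := by
      rw [PySem.Int.floordiv_eq_ediv_of_pos (by omega : (0:Int) < 2)]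
      omega
    rw [hk]
    show aAcc m = (((List.range (m / 2)).map (fun (k : Nat) => 2 + 2 * (k : Int))).foldl
      (fun (p : Int × Int) j =>
        let f := p.1 * ((j - 1) * j)
        (f, p.2 + f))
      (1, (((m + 1) / 2 : Nat) : Int) ^ 2)).2
    rw [bloop, aAcc_closed m]
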